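-- pv_equiv track=rewrite | github.com/leonbrill3/domain-discovery | scripts/generate_patterns.py | is_pronounceable
-- ===== SOURCE A (Python) =====
-- CONSONANTS = list('bcdfghjklmnprstvwz')
--
-- VOWELS = list('aeiou')
--
-- BAD_PATTERNS = {
--     # Double letters that look weird
--     'aa', 'ii', 'uu',
--     # Hard to pronounce
--     'bv', 'fv', 'gj', 'hj', 'kj', 'pv', 'vb', 'vf', 'vp',
--     # Just ugly
--     'jr', 'rj', 'wj', 'jw', 'zj', 'jz',
-- }
--
-- def is_pronounceable(word: str) -> bool:
--     """Filter out unpronounceable combinations."""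
--     word = word.lower()
--
--     # Check for bad patterns
--     for bad in BAD_PATTERNS:
--         if bad in word:
--             return False
--
--     # No triple consonants
--     consonant_count = 0
--     for char in word:
--         if char in CONSONANTS:
--             consonant_count += 1
--             if consonant_count >= 3:
--                 return False
--         else:
--             consonant_count = 0
--
--     # No triple vowels
--     vowel_count = 0
--     for char in word:
--         if char in VOWELS:
--             vowel_count += 1
--             if vowel_count >= 3:
--                 return False
--         else:
--             vowel_count = 0
--
--     return True
-- ===== SOURCE B (Python) =====
-- BAD_PATTERNS = {
--     'aa', 'ii', 'uu',
--     'bv', 'fv', 'gj', 'hj', 'kj', 'pv', 'vb', 'vf', 'vp',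
--     'jr', 'rj', 'wj', 'jw', 'zj', 'jz',
-- }
--
-- CONSONANT_SET = set('bcdfghjklmnprstvwz')
-- VOWEL_SET = set('aeiou')
--
-- def is_pronounceable(word: str) -> bool:
--     """Single pass over the word: reject a bad adjacent pair or a run of 3."""
--     word = word.lower()
--     consonant_run = 0
--     vowel_run = 0
--     for i, char in enumerate(word):
--         if word[i:i+2] in BAD_PATTERNS:
--             return False
--         if char in CONSONANT_SET:
--             consonant_run += 1
--             vowel_run = 0
--         elif char in VOWEL_SET:
--             vowel_run += 1
--             consonant_run = 0
--         else:
--             consonant_run = 0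
--             vowel_run = 0
--         if consonant_run >= 3 or vowel_run >= 3:
--             return False
--     return True
-- ===== Notes on version B (the rewrite author's own statement) =====
-- stated objective: simpler
-- what changed: B replaces A's three separate scans (a loop over the 22 fixed patterns doing substring searches, then a consonant-run pass, then a vowel-run pass) with one single left-to-right pass over the word positions that checks word[i:i+2] against the pattern set and maintains both run counters simultaneously.
import Mathlib
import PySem

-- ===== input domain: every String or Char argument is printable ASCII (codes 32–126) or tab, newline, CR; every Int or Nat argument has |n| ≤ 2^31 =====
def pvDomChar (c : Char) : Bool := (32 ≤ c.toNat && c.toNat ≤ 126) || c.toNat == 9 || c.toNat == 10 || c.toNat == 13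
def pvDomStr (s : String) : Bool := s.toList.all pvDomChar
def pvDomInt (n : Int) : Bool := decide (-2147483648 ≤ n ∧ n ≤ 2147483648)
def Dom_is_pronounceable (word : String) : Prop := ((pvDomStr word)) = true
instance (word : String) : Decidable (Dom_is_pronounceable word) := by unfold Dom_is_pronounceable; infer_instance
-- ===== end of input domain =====

-- B is one single pass over the word positions (pair check + both run counters together)
-- instead of A's 22 substring searches followed by two separate run scans; return value only.

-- ===== PORT A =====
def pvConsonantsA : List Char :=
  ['b','c','d','f','g','h','j','k','l','m','n','p','r','s','t','v','w','z']

def pvVowelsA : List Char := ['a','e','i','o','u']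

-- Python's BAD_PATTERNS is a set literal; its iteration order is irrelevant to the Bool
-- result (the loop only asks whether ANY pattern occurs), so it is ported in written order.
def pvBadPatternsA : List (List Char) :=
  [['a','a'],['i','i'],['u','u'],
   ['b','v'],['f','v'],['g','j'],['h','j'],['k','j'],['p','v'],['v','b'],['v','f'],['v','p'],
   ['j','r'],['r','j'],['w','j'],['j','w'],['z','j'],['j','z']]

-- 'for char in word: if char in CONSONANTS: count += 1; if count >= 3: return False; else: count = 0'
def pvConsLoopA : List Char → Nat → Bool
  | [], _ => true
  | c :: t, cnt =>
    if pvConsonantsA.contains c then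
      if cnt + 1 ≥ 3 then false else pvConsLoopA t (cnt + 1)
    else pvConsLoopA t 0

def pvVowLoopA : List Char → Nat → Bool
  | [], _ => true
  | c :: t, cnt =>
    if pvVowelsA.contains c then
      if cnt + 1 ≥ 3 then false else pvVowLoopA t (cnt + 1)
    else pvVowLoopA t 0

def is_pronounceable (word : String) : Bool :=
  let w := PySem.Chars.lower word.toList
  if pvBadPatternsA.any (fun bad => PySem.Chars.isIn bad w) then false
  else pvConsLoopA w 0 && pvVowLoopA w 0

-- ===== PORT B =====
def pvBadSetB : PySem.Set (List Char) :=
  PySem.Set.ofList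
    [['a','a'],['i','i'],['u','u'],
     ['b','v'],['f','v'],['g','j'],['h','j'],['k','j'],['p','v'],['v','b'],['v','f'],['v','p'],
     ['j','r'],['r','j'],['w','j'],['j','w'],['z','j'],['j','z']]

def pvConsSetB : PySem.Set Char :=
  PySem.Set.ofList ['b','c','d','f','g','h','j','k','l','m','n','p','r','s','t','v','w','z']

def pvVowSetB : PySem.Set Char := PySem.Set.ofList ['a','e','i','o','u']

-- the loop body of B: 'word[i:i+2]' on the remaining suffix c :: rest is c :: rest.take 1
def pvScanB : List Char → Nat → Nat → Bool
  | [], _, _ => true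
  | c :: rest, cr, vr =>
    if PySem.Set.contains pvBadSetB (c :: rest.take 1) then false
    else
      let p : Nat × Nat :=
        if PySem.Set.contains pvConsSetB c then (cr + 1, 0)
        else if PySem.Set.contains pvVowSetB c then (0, vr + 1)
        else (0, 0)
      if p.1 ≥ 3 ∨ p.2 ≥ 3 then false else pvScanB rest p.1 p.2

def is_pronounceable_alt (word : String) : Bool :=
  pvScanB (PySem.Chars.lower word.toList) 0 0

-- ===== PRECONDITION & SPEC =====
def Spec_is_pronounceable (word : String) (out : Bool) : Prop := out = is_pronounceable_alt word
instance (word : String) (out : Bool) : Decidable (Spec_is_pronounceable word out) := by unfold Spec_is_pronounceable; infer_instance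

-- ===== CLAIM (what is proved, stated in full; the proofs are below) =====
def Claim_equal_is_pronounceable : Prop := ∀ (word : String), Dom_is_pronounceable word → Spec_is_pronounceable word (is_pronounceable word)

-- ===== LEMMAS AND PROOFS =====

-- adjacent-pair scan: the reference shape both sides are reduced to
def pvBadScan : List Char → Bool
  | a :: b :: t => pvBadPatternsA.contains [a, b] || pvBadScan (b :: t)
  | _ => false

lemma badSetB_eq : pvBadSetB = pvBadPatternsA := by decide

lemma consSetB_eq : pvConsSetB = pvConsonantsA := by decide

lemma vowSetB_eq : pvVowSetB = pvVowelsA := by decide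

lemma single_not_bad (c : Char) : [c] ∉ pvBadPatternsA := by
  simp [pvBadPatternsA]

lemma cons_not_vow (c : Char) (h : c ∈ pvConsonantsA) : c ∉ pvVowelsA := by
  fin_cases h <;> decide

lemma scanB_eq (l : List Char) (cr vr : Nat) :
    pvScanB l cr vr = (!pvBadScan l && pvConsLoopA l cr && pvVowLoopA l vr) := by
  induction l generalizing cr vr with
  | nil => simp [pvScanB, pvBadScan, pvConsLoopA, pvVowLoopA]
  | cons c rest ih =>
    cases rest with
    | nil =>
      conv_lhs => rw [pvScanB.eq_2]
      by_cases hc : c ∈ pvConsonantsA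
      · have hv := cons_not_vow c hc
        simp [pvScanB, pvBadScan, pvConsLoopA, pvVowLoopA, badSetB_eq, consSetB_eq, vowSetB_eq,
          single_not_bad, hc, hv]
      · by_cases hv : c ∈ pvVowelsA
        · simp [pvScanB, pvBadScan, pvConsLoopA, pvVowLoopA, badSetB_eq, consSetB_eq, vowSetB_eq,
            single_not_bad, hc, hv]
        · simp [pvScanB, pvBadScan, pvConsLoopA, pvVowLoopA, badSetB_eq, consSetB_eq, vowSetB_eq,
            single_not_bad, hc, hv]
    | cons d t =>
      conv_lhs => rw [pvScanB.eq_2]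
      by_cases hb : [c, d] ∈ pvBadPatternsA
      · simp [pvBadScan, badSetB_eq, hb]
      · by_cases hc : c ∈ pvConsonantsA
        · have hv := cons_not_vow c hc
          by_cases h3 : cr + 1 ≥ 3
          · simp [pvBadScan, pvConsLoopA, pvVowLoopA, badSetB_eq, consSetB_eq,
              hb, hc, hv, h3]
          · simp [pvBadScan, pvConsLoopA, pvVowLoopA, badSetB_eq, consSetB_eq, vowSetB_eq,
              hb, hc, hv, h3, ih]
        · by_cases hv : c ∈ pvVowelsA
          · by_cases h3 : vr + 1 ≥ 3
            · simp [pvBadScan, pvConsLoopA, pvVowLoopA, badSetB_eq, consSetB_eq, vowSetB_eq,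
                hb, hc, hv, h3, ih]
            · simp [pvBadScan, pvConsLoopA, pvVowLoopA, badSetB_eq, consSetB_eq, vowSetB_eq,
                hb, hc, hv, h3, ih]
          · simp [pvBadScan, pvConsLoopA, pvVowLoopA, badSetB_eq, consSetB_eq, vowSetB_eq,
              hb, hc, hv, ih]

lemma badScan_iff (l : List Char) :
    pvBadScan l = true ↔ ∃ x y, [x, y] ∈ pvBadPatternsA ∧ [x, y] <:+: l := by
  induction l with
  | nil =>
    simp only [pvBadScan]
    constructor
    · intro h; exact absurd h (by simp)
    · rintro ⟨x, y, -, h⟩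
      have := h.length_le; simp at this
  | cons a t ih =>
    cases t with
    | nil =>
      simp only [pvBadScan]
      constructor
      · intro h; exact absurd h (by simp)
      · rintro ⟨x, y, -, h⟩
        have := h.length_le; simp at this
    | cons b t' =>
      simp only [pvBadScan, Bool.or_eq_true, ih, List.contains_iff_mem]
      constructor
      · rintro (h | ⟨x, y, hxy, hinf⟩)
        · exact ⟨a, b, h, ⟨[], t', by simp⟩⟩
        · exact ⟨x, y, hxy, List.infix_cons hinf⟩
      · rintro ⟨x, y, hxy, hinf⟩
        rcases (List.infix_cons_iff).1 hinf with hpre | hsuf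
        · rcases hpre with ⟨s, hs⟩
          injection hs with h1 hs; injection hs with h2 _
          subst h1; subst h2; exact Or.inl hxy
        · exact Or.inr ⟨x, y, hxy, hsuf⟩

lemma badPattern_len : ∀ p ∈ pvBadPatternsA, p.length = 2 := by decide

lemma anyBad_eq_badScan (l : List Char) :
    pvBadPatternsA.any (fun bad => PySem.Chars.isIn bad l) = pvBadScan l := by
  rcases h : pvBadScan l with _ | _
  · rcases ha : pvBadPatternsA.any (fun bad => PySem.Chars.isIn bad l) with _ | _
    · rfl
    · exfalso
      rcases List.any_eq_true.1 ha with ⟨p, hp, hin⟩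
      have hinf := (PySem.Chars.isIn_iff_infix p l).1 hin
      have hlen := badPattern_len p hp
      match p, hlen, hp, hinf with
      | [x, y], _, hp, hinf =>
        have : pvBadScan l = true := (badScan_iff l).2 ⟨x, y, hp, hinf⟩
        simp [h] at this
  · rcases (badScan_iff l).1 h with ⟨x, y, hxy, hinf⟩
    refine List.any_eq_true.2 ⟨[x, y], hxy, ?_⟩
    exact (PySem.Chars.isIn_iff_infix _ _).2 hinf

-- ===== VERDICT (by name: the statement is the Claim_ definition above) =====
theorem is_pronounceable_spec : Claim_equal_is_pronounceable := by
  intro word _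
  unfold Spec_is_pronounceable is_pronounceable is_pronounceable_alt
  rw [scanB_eq]
  show (if pvBadPatternsA.any (fun bad => PySem.Chars.isIn bad (PySem.Chars.lower word.toList)) = true
        then false
        else pvConsLoopA (PySem.Chars.lower word.toList) 0 && pvVowLoopA (PySem.Chars.lower word.toList) 0) = _
  rw [anyBad_eq_badScan]
  cases h : pvBadScan (PySem.Chars.lower word.toList) <;> simp
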